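-- pv_equiv track=rewrite | github.com/analysis-bots/FEDEx_Generator | tests/test_utils.py | fix_duplicate_col_names_and_bin_names
-- ===== SOURCE A (Python) =====
-- from typing import List, Dict
--
-- def fix_duplicate_col_names_and_bin_names(dict_list: List[Dict]):
--     """
--     This function takes a list of influence values dictionaries or significance values dictionaries,
--     and fixes the duplicate column names and bin names by appending a number to the column name and bin name.
--     :param dict_list: List of dictionaries, in the format of influence values or significance values.
--     :return: List of dictionaries, with fixed duplicate column names and bin names.
--     """
--     keys = set()
--     idx_dict = {}
--     for d in dict_list:
--         col_name = d['column']
--         bin_name = d['bin']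
--         if col_name in keys:
--             idx_dict[col_name] += 1
--             d['column'] = f'{col_name}_{idx_dict[col_name]}'
--             d['bin'] = f'{bin_name}_{idx_dict[col_name]}'
--         else:
--             keys.add(col_name)
--             idx_dict[col_name] = 1
--     return dict_list
-- ===== SOURCE B (Python) =====
-- from typing import List, Dict
--
-- def fix_duplicate_col_names_and_bin_names(dict_list: List[Dict]):
--     # Staged, column-grouped strategy: snapshot the original column/bin values,
--     # then make one renaming pass per distinct column, numbering its occurrences.
--     cols = [d['column'] for d in dict_list]
--     bins = [d['bin'] for d in dict_list]
--     for col in dict.fromkeys(cols):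
--         k = 0
--         for c, b, d in zip(cols, bins, dict_list):
--             if c == col:
--                 k += 1
--                 if k > 1:
--                     d['column'] = f'{col}_{k}'
--                     d['bin'] = f'{b}_{k}'
--     return dict_list
-- ===== Notes on version B (the rewrite author's own statement) =====
-- stated objective: alternative
-- what changed: Replaced A's single pass with seen-set/counter-dict bookkeeping by a staged column-grouped strategy: snapshot the column/bin values, then run one renaming pass per distinct column (dict.fromkeys order), numbering that column's occurrences as it scans.
-- outside the precondition, e.g. on fix_duplicate_col_names_and_bin_names([{'column': 'a'}]): A raises KeyError, B raises KeyError
import Mathlib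
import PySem

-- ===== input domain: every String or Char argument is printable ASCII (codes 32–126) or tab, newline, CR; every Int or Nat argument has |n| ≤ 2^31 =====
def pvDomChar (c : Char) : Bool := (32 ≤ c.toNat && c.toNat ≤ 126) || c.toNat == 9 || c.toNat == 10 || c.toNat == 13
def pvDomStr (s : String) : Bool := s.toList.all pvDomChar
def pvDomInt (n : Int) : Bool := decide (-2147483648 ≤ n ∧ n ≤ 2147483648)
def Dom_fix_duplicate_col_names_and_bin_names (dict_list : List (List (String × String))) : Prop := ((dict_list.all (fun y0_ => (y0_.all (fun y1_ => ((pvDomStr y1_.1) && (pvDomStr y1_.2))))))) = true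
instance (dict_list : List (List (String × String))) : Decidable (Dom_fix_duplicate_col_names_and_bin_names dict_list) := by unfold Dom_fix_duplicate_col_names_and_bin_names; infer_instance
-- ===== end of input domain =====

-- B replaces A's single seen-set/counter-dict pass by a staged, column-grouped strategy:
-- snapshot the column/bin values, then one renaming pass per distinct column. Both Pythons
-- mutate the dicts in place and return the same list object; the equivalence proved here is
-- about the returned value (alias-free lists).

-- shared trivial accessors: d['column'], d['bin'], f'{s}_{n}', and the two renaming
-- assignments d['column'] = f'{c}_{n}'; d['bin'] = f'{b}_{n}' both Pythons perform verbatim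
def pvColOf (d : List (String × String)) : String := (PySem.Dict.mk d).getD "column" ""
def pvBinOf (d : List (String × String)) : String := (PySem.Dict.mk d).getD "bin" ""
def pvTag (s : String) (n : Int) : String := s ++ "_" ++ PySem.Int.toStr n
def pvRen (d : List (String × String)) (c b : String) (n : Int) : List (String × String) :=
  (((PySem.Dict.mk d).insert "column" (pvTag c n)).insert "bin" (pvTag b n)).items

-- ===== PORT A =====
-- the for-loop of A: state = (keys, idx_dict), one step per dict
def pvGoA (keys : PySem.Set String) (idx : PySem.Dict String Int) :
    List (List (String × String)) → List (List (String × String))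
  | [] => []
  | d :: rest =>
    let col := pvColOf d          -- d['column']  (Pre_ guarantees the key)
    let bin := pvBinOf d          -- d['bin']     (Pre_ guarantees the key)
    if PySem.Set.contains keys col then
      let n := idx.getD col 0 + 1 -- idx_dict[col_name] += 1
      pvRen d col bin n :: pvGoA keys (idx.insert col n) rest
    else
      d :: pvGoA (PySem.Set.add keys col) (idx.insert col 1) rest

def fix_duplicate_col_names_and_bin_names (dict_list : List (List (String × String))) : List (List (String × String)) :=
  pvGoA PySem.Set.empty PySem.Dict.empty dict_list

-- ===== PORT B =====
-- the inner 'for c, b, d in zip(cols, bins, dict_list)' pass for one column, with counter k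
def pvPass (col : String) : Int → List String → List String →
    List (List (String × String)) → List (List (String × String))
  | k, c :: cs, b :: bs, d :: ds =>
    if c == col then
      (if k + 1 > 1 then pvRen d col b (k + 1) else d) :: pvPass col (k + 1) cs bs ds
    else
      d :: pvPass col k cs bs ds
  | _, _, _, ds => ds   -- zip stops at the shortest list; the remaining dicts stay untouched

def fix_duplicate_col_names_and_bin_names_alt (dict_list : List (List (String × String))) : List (List (String × String)) :=
  let cols := dict_list.map pvColOf        -- [d['column'] for d in dict_list]
  let bins := dict_list.map pvBinOf        -- [d['bin'] for d in dict_list]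
  (PySem.List.dedup cols).foldl (fun lst col => pvPass col 0 cols bins lst) dict_list

-- ===== PRECONDITION & SPEC =====
-- Pre_ excludes exactly the inputs on which the Python A raises KeyError: some dict
-- missing the key 'column' or the key 'bin' (A reads both keys of every dict).
def Pre_fix_duplicate_col_names_and_bin_names (dict_list : List (List (String × String))) : Prop :=
  ∀ d ∈ dict_list, (PySem.Dict.mk d).contains "column" = true ∧ (PySem.Dict.mk d).contains "bin" = true
instance (dict_list : List (List (String × String))) : Decidable (Pre_fix_duplicate_col_names_and_bin_names dict_list) := by unfold Pre_fix_duplicate_col_names_and_bin_names; infer_instance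

def pvWitness_fix_duplicate_col_names_and_bin_names : (List (List (String × String))) :=
  [[("column", "a"), ("bin", "x")], [("column", "a"), ("bin", "y")], [("column", "b"), ("bin", "x")]]

def Spec_fix_duplicate_col_names_and_bin_names (dict_list : List (List (String × String))) (out : List (List (String × String))) : Prop := out = fix_duplicate_col_names_and_bin_names_alt dict_list
instance (dict_list : List (List (String × String))) (out : List (List (String × String))) : Decidable (Spec_fix_duplicate_col_names_and_bin_names dict_list out) := by unfold Spec_fix_duplicate_col_names_and_bin_names; infer_instance

-- ===== CLAIM (what is proved, stated in full; the proofs are below) =====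
def Claim_equal_fix_duplicate_col_names_and_bin_names : Prop := ∀ (dict_list : List (List (String × String))), Dom_fix_duplicate_col_names_and_bin_names dict_list → Pre_fix_duplicate_col_names_and_bin_names dict_list → Spec_fix_duplicate_col_names_and_bin_names dict_list (fix_duplicate_col_names_and_bin_names dict_list)

-- ===== LEMMAS AND PROOFS =====

-- common specification both ports are reduced to: entry-by-entry, the suffix number of an
-- entry is 1 + (count of its column among the already-processed columns `prev`), entries
-- whose column is fresh stay unchanged
def pvSpecGo (prev : List String) : List (List (String × String)) → List (List (String × String))
  | [] => []
  | d :: t =>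
    (if prev.count (pvColOf d) > 0 then
       pvRen d (pvColOf d) (pvBinOf d) ((prev.count (pvColOf d) : Int) + 1)
     else d) :: pvSpecGo (prev ++ [pvColOf d]) t

-- ===== A-side: pvGoA equals pvSpecGo =====
lemma pvGoA_eq (rest : List (List (String × String))) :
    ∀ (prev : List String) (keys : PySem.Set String) (idx : PySem.Dict String Int),
    (∀ c, PySem.Set.contains keys c = true ↔ c ∈ prev) →
    (∀ c ∈ prev, idx.getD c 0 = (prev.count c : Int)) →
    pvGoA keys idx rest = pvSpecGo prev rest := by
  induction rest with
  | nil => intro prev keys idx _ _; rfl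
  | cons d t ih =>
    intro prev keys idx hk hi
    by_cases hmem : pvColOf d ∈ prev
    · have hc : PySem.Set.contains keys (pvColOf d) = true := (hk _).2 hmem
      have hpos : 0 < prev.count (pvColOf d) := List.count_pos_iff.2 hmem
      simp only [pvGoA, pvSpecGo, hc, if_true, if_pos hpos, hi _ hmem]
      refine congrArg (List.cons _) (ih (prev ++ [pvColOf d]) keys _ ?_ ?_)
      · intro c
        rw [hk c]
        constructor
        · intro h; exact List.mem_append.2 (Or.inl h)
        · intro h
          rcases List.mem_append.1 h with h | h
          · exact h
          · exact (List.mem_singleton.1 h) ▸ hmem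
      · intro c hcmem
        rw [PySem.Dict.getD_insert]
        by_cases hcd : c = pvColOf d
        · subst hcd
          rw [if_pos rfl]
          simp [List.count_append]
        · rw [if_neg hcd]
          have hc' : c ∈ prev := by
            rcases List.mem_append.1 hcmem with h | h
            · exact h
            · exact absurd (List.mem_singleton.1 h) hcd
          rw [hi _ hc']
          have hz : List.count c [pvColOf d] = 0 :=
            List.count_eq_zero.2 (fun h => hcd (List.mem_singleton.1 h))
          simp [List.count_append, hz]
    · have hc : ¬ PySem.Set.contains keys (pvColOf d) = true := fun h => hmem ((hk _).1 h)
      have hz : prev.count (pvColOf d) = 0 := List.count_eq_zero.2 hmem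
      simp only [pvGoA, pvSpecGo, if_neg hc, hz, if_neg (lt_irrefl 0)]
      refine congrArg (List.cons _) (ih (prev ++ [pvColOf d]) _ _ ?_ ?_)
      · intro c
        rw [PySem.Set.contains_iff, PySem.Set.mem_add,
          ← PySem.Set.contains_iff, hk c]
        simp [or_comm]
      · intro c hcmem
        rw [PySem.Dict.getD_insert]
        by_cases hcd : c = pvColOf d
        · subst hcd
          rw [if_pos rfl]
          simp [List.count_append, hz]
        · rw [if_neg hcd]
          have hc' : c ∈ prev := by
            rcases List.mem_append.1 hcmem with h | h
            · exact h
            · exact absurd (List.mem_singleton.1 h) hcd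
          rw [hi _ hc']
          have hz1 : List.count c [pvColOf d] = 0 :=
            List.count_eq_zero.2 (fun h => hcd (List.mem_singleton.1 h))
          simp [List.count_append, hz1]

-- ===== B-side: the fold of per-column passes equals pvSpecGo =====

-- partial result: entries whose column is in the processed set S are finalized, others original
def pvApplyP (S : List String) : List String → List (List (String × String)) → List (List (String × String))
  | _, [] => []
  | prev, d :: t =>
    (if pvColOf d ∈ S ∧ prev.count (pvColOf d) > 0 then
       pvRen d (pvColOf d) (pvBinOf d) ((prev.count (pvColOf d) : Int) + 1)
     else d) :: pvApplyP S (prev ++ [pvColOf d]) t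

lemma pvApplyP_nil (l : List (List (String × String))) :
    ∀ prev, pvApplyP [] prev l = l := by
  induction l with
  | nil => intro prev; rfl
  | cons d t ih => intro prev; simp [pvApplyP, ih]

-- one pass for a not-yet-processed column col finalizes exactly col's entries
lemma pvPass_applyP (l : List (List (String × String))) :
    ∀ (prev S : List String) (col : String), col ∉ S →
    pvPass col (prev.count col : Int) (l.map pvColOf) (l.map pvBinOf) (pvApplyP S prev l) =
      pvApplyP (S ++ [col]) prev l := by
  induction l with
  | nil => intro prev S col _; rfl
  | cons d t ih =>
    intro prev S col hS
    simp only [List.map_cons, pvApplyP]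
    by_cases hcd : pvColOf d = col
    · -- head's column is col: it is not in S, so the head is still original; pass handles it
      have hnotS : ¬ (pvColOf d ∈ S ∧ prev.count (pvColOf d) > 0) := by
        intro h; exact hS (hcd ▸ h.1)
      rw [if_neg hnotS]
      simp only [pvPass, hcd, BEq.rfl, if_true]
      have hcnt1 : ((prev.count col : Int) + 1 > 1) ↔ prev.count col > 0 := by
        constructor <;> intro h <;> omega
      have hrec := ih (prev ++ [col]) S col hS
      have hcc : ((prev ++ [col]).count col : Int) = (prev.count col : Int) + 1 := by
        simp [List.count_append]
      rw [hcc] at hrec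
      rw [hrec]
      by_cases hpos : prev.count col > 0
      · rw [if_pos (hcnt1.2 hpos), if_pos ⟨by simp, hpos⟩]
      · rw [if_neg (fun h => hpos (hcnt1.1 h)), if_neg (fun h => hpos h.2)]
    · -- head's column differs from col: the pass leaves it alone
      have hbeq : ((pvColOf d) == col) = false := by simp [hcd]
      simp only [pvPass, hbeq, Bool.false_eq_true, if_false]
      have hSiff : (pvColOf d ∈ S ++ [col]) ↔ pvColOf d ∈ S := by
        simp [List.mem_append, hcd]
      have hrec := ih (prev ++ [pvColOf d]) S col hS
      have hcc : ((prev ++ [pvColOf d]).count col : Int) = (prev.count col : Int) := by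
        have hz : List.count col [pvColOf d] = 0 :=
          List.count_eq_zero.2 (fun h => hcd (List.mem_singleton.1 h).symm)
        simp [List.count_append, hz]
      rw [hcc] at hrec
      rw [hrec]
      by_cases hin : pvColOf d ∈ S ∧ prev.count (pvColOf d) > 0
      · rw [if_pos hin, if_pos ⟨hSiff.2 hin.1, hin.2⟩]
      · rw [if_neg hin, if_neg (fun h => hin ⟨hSiff.1 h.1, h.2⟩)]

-- folding passes over a duplicate-free list of columns disjoint from S
lemma pvFold_applyP (us : List String) :
    ∀ (S : List String) (l : List (List (String × String))),
    us.Nodup → (∀ c ∈ us, c ∉ S) →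
    us.foldl (fun lst col => pvPass col 0 (l.map pvColOf) (l.map pvBinOf) lst) (pvApplyP S [] l) =
      pvApplyP (S ++ us) [] l := by
  induction us with
  | nil => intro S l _ _; simp
  | cons u t ih =>
    intro S l hnd hdisj
    simp only [List.foldl_cons]
    have h0 : ((List.nil.count u : Nat) : Int) = 0 := by simp
    have hpass := pvPass_applyP l [] S u (hdisj u (by simp))
    rw [h0] at hpass
    rw [hpass]
    have := ih (S ++ [u]) l hnd.of_cons (by
      intro c hc hmem
      rcases List.mem_append.1 hmem with h | h
      · exact hdisj c (by simp [hc]) h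
      · exact (List.nodup_cons.1 hnd).1 (List.mem_singleton.1 h ▸ hc))
    rw [this, List.append_assoc]
    rfl

-- once every column of the list is in S, the partial result is the full specification
lemma pvApplyP_full (l : List (List (String × String))) :
    ∀ (prev S : List String), (∀ d ∈ l, pvColOf d ∈ S) →
    pvApplyP S prev l = pvSpecGo prev l := by
  induction l with
  | nil => intro prev S _; rfl
  | cons d t ih =>
    intro prev S hall
    simp only [pvApplyP, pvSpecGo]
    refine congrArg₂ List.cons ?_ (ih _ S (fun x hx => hall x (by simp [hx])))
    have hd : pvColOf d ∈ S := hall d (by simp)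
    by_cases hpos : prev.count (pvColOf d) > 0
    · rw [if_pos ⟨hd, hpos⟩, if_pos hpos]
    · rw [if_neg (fun h => hpos h.2), if_neg hpos]

-- ===== VERDICT (by name: the statement is the Claim_ definition above) =====
theorem fix_duplicate_col_names_and_bin_names_spec : Claim_equal_fix_duplicate_col_names_and_bin_names := by
  intro dict_list _ _
  unfold Spec_fix_duplicate_col_names_and_bin_names
  unfold fix_duplicate_col_names_and_bin_names fix_duplicate_col_names_and_bin_names_alt
  have hA := pvGoA_eq dict_list [] PySem.Set.empty PySem.Dict.empty
    (by intro c; simp [PySem.Set.empty, PySem.Set.contains]) (by intro c hc; simp at hc)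
  have hB := pvFold_applyP (PySem.List.dedup (dict_list.map pvColOf)) [] dict_list
    (PySem.List.nodup_dedup (dict_list.map pvColOf))
    (by intro c _ hmem; simp at hmem)
  rw [pvApplyP_nil dict_list []] at hB
  simp only [List.nil_append] at hB
  rw [hA, hB, pvApplyP_full]
  intro d hd
  rw [PySem.List.mem_dedup]
  exact List.mem_map_of_mem hd
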